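-- pv_equiv track=rewrite | github.com/usamaehsan/juggernaut-xl-x-adapters-x-lightning | predict.py | sort_dict_by_string
-- ===== SOURCE A (Python) =====
-- def sort_dict_by_string(input_string, your_dict):
--     if not input_string or not isinstance(input_string, str):
--         # Return the original dictionary if the string is empty or not a string
--         return your_dict
--
--     order_list = [item.strip() for item in input_string.split(',')]
--
--     # Include keys from the input string that are present in the dictionary
--     valid_keys = [key for key in order_list if key in your_dict]
--
--     # Include keys from the dictionary that are not in the input string
--     remaining_keys = [key for key in your_dict if key not in valid_keys]
--
--     sorted_dict = {key: your_dict[key] for key in valid_keys}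
--     sorted_dict.update({key: your_dict[key] for key in remaining_keys})
--
--     return sorted_dict
-- ===== SOURCE B (Python) =====
-- def sort_dict_by_string(input_string, your_dict):
--     if not input_string or not isinstance(input_string, str):
--         # Return the original dictionary if the string is empty or not a string
--         return your_dict
--
--     rest = dict(your_dict)
--     out = {}
--     for name in input_string.split(','):
--         name = name.strip()
--         if name in rest:
--             out[name] = rest.pop(name)
--     out.update(rest)
--     return out
-- ===== Notes on version B (the rewrite author's own statement) =====
-- stated objective: idiomatic
-- what changed: Instead of building valid_keys/remaining_keys lists with list-membership rescans and two dict comprehensions, B makes one pass over the comma-separated names popping matched entries out of a working copy of the dict, then appends the leftover entries.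
import Mathlib
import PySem

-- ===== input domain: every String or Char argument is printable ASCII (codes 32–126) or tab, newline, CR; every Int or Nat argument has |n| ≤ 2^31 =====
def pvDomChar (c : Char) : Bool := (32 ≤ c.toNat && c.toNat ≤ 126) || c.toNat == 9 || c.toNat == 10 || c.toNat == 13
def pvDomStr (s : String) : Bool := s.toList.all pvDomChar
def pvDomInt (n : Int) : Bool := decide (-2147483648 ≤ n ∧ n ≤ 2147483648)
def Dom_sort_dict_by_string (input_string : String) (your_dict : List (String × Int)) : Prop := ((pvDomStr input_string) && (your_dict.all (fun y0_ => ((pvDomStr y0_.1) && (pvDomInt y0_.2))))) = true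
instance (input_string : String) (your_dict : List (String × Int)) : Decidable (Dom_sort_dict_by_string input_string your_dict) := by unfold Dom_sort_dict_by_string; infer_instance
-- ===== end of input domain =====

-- B replaces A's two filtered passes (with an inner membership scan over valid_keys) by one pass
-- over the order names that pops matched entries out of a working copy of the dict; objective: idiomatic.

-- ===== PORT A =====
def sort_dict_by_string (input_string : String) (your_dict : List (String × Int)) : List (String × Int) :=
  if input_string = "" then your_dict
  else
    let d := PySem.Dict.ofList your_dict
    let order_list := ((PySem.Str.split? input_string ",").getD []).map PySem.Str.strip
    let valid_keys := order_list.filter (fun key => d.contains key)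
    let remaining_keys := d.keys.filter (fun key => !(valid_keys.contains key))
    let sorted_dict := valid_keys.foldl (fun acc key => acc.insert key (d.getD key 0)) PySem.Dict.empty
    let sorted_dict := sorted_dict.update
      ((remaining_keys.foldl (fun acc key => acc.insert key (d.getD key 0)) PySem.Dict.empty).items)
    sorted_dict.items

-- ===== PORT B =====
def sort_dict_by_string_alt (input_string : String) (your_dict : List (String × Int)) : List (String × Int) :=
  if input_string = "" then your_dict
  else
    let st := ((PySem.Str.split? input_string ",").getD []).foldl
      (fun (st : PySem.Dict String Int × PySem.Dict String Int) name =>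
        let name' := PySem.Str.strip name
        match st.1.pop? name' with
        | some (v, rest) => (rest, st.2.insert name' v)
        | none => st)
      (PySem.Dict.ofList your_dict, PySem.Dict.empty)
    (st.2.update st.1.items).items

-- ===== PRECONDITION & SPEC =====
def Spec_sort_dict_by_string (input_string : String) (your_dict : List (String × Int)) (out : List (String × Int)) : Prop := out = sort_dict_by_string_alt input_string your_dict
instance (input_string : String) (your_dict : List (String × Int)) (out : List (String × Int)) : Decidable (Spec_sort_dict_by_string input_string your_dict out) := by unfold Spec_sort_dict_by_string; infer_instance

-- ===== CLAIM (what is proved, stated in full; the proofs are below) =====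
def Claim_equal_sort_dict_by_string : Prop := ∀ (input_string : String) (your_dict : List (String × Int)), Dom_sort_dict_by_string input_string your_dict → Spec_sort_dict_by_string input_string your_dict (sort_dict_by_string input_string your_dict)

-- ===== LEMMAS AND PROOFS =====

-- the single-pass loop body of port B, on an already-stripped name
def pvStep (st : PySem.Dict String Int × PySem.Dict String Int) (n : String) :
    PySem.Dict String Int × PySem.Dict String Int :=
  match st.1.pop? n with
  | some (v, rest) => (rest, st.2.insert n v)
  | none => st

-- the common closed form both ports are reduced to: picked pairs (distinct valid order names,
-- first-occurrence order) followed by the untouched entries of d in dict order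
def pvF (names : List String) (d : PySem.Dict String Int) : List (String × Int) :=
  (PySem.Set.ofList (names.filter (fun k => d.contains k))).map (fun k => (k, d.getD k 0))
    ++ d.items.filter (fun p => !(names.contains p.1))

theorem pv_anyScans (s : List String) (f : String → Int) (x : String) :
    (s.map (fun k => (k, f k))).any (fun p => p.1 == x) = s.contains x := by
  induction s with
  | nil => rfl
  | cons a t ih =>
    by_cases h : a = x
    · simp [h, ih]
    · simp [h, ih, Ne.symm h, beq_iff_eq]

theorem pv_map_fst_filter (l : List (String × Int)) (q : String → Bool) :
    (l.filter (fun p => q p.1)).map Prod.fst = (l.map Prod.fst).filter q := by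
  induction l with
  | nil => rfl
  | cons a t ih => by_cases h : q a.1 <;> simp [h, ih]

theorem pv_keys_erase (d : PySem.Dict String Int) (k : String) :
    (d.erase k).keys = d.keys.filter (fun x => !(x == k)) := by
  simpa [PySem.Dict.erase, PySem.Dict.keys] using
    pv_map_fst_filter d.items (fun x => !(x == k))

theorem pv_contains_erase (d : PySem.Dict String Int) (k x : String) :
    (d.erase k).contains x = (d.contains x && !(x == k)) := by
  rw [Bool.eq_iff_iff]
  by_cases h : x = k <;>
    simp [PySem.Dict.contains_iff_mem_keys, pv_keys_erase, List.mem_filter, h]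

theorem pv_get?_erase_ne (d : PySem.Dict String Int) (k x : String) (h : x ≠ k) :
    (d.erase k).get? x = d.get? x := by
  obtain ⟨l⟩ := d
  simp only [PySem.Dict.erase, PySem.Dict.get?]
  congr 1
  induction l with
  | nil => rfl
  | cons a t ih =>
    by_cases h1 : a.1 = k
    · have hax : (a.1 == x) = false := by
        rw [h1]; exact beq_eq_false_iff_ne.mpr (fun e => h e.symm)
      have hkx : (k == x) = false := beq_eq_false_iff_ne.mpr (Ne.symm h)
      simp [h1, List.find?_cons, hax, hkx, ih]
    · by_cases h2 : a.1 = x <;>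
        simp [List.filter_cons, List.find?_cons, h1, h2, h, ih]

theorem pv_update_disjoint (l : List (String × Int)) (dd : PySem.Dict String Int)
    (hn : (l.map Prod.fst).Nodup) (hd : ∀ p ∈ l, dd.contains p.1 = false) :
    (dd.update l).items = dd.items ++ l := by
  induction l generalizing dd with
  | nil => simp [PySem.Dict.update]
  | cons a t ih =>
    have hna : dd.contains a.1 = false := hd a (by simp)
    have hd' : ∀ p ∈ t, (dd.insert a.1 a.2).contains p.1 = false := by
      intro p hp
      rw [PySem.Dict.contains_insert]
      have hne : (p.1 == a.1) = false := by
        refine beq_eq_false_iff_ne.mpr (fun e => ?_)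
        exact (List.nodup_cons.mp hn).1 (e ▸ List.mem_map_of_mem hp)
      simp [hne, hd p (List.mem_cons_of_mem _ hp)]
    have hstep : dd.update (a :: t) = (dd.insert a.1 a.2).update t := rfl
    rw [hstep, ih (dd.insert a.1 a.2) (List.nodup_cons.mp hn).2 hd',
        PySem.Dict.items_insert_of_not_contains dd a.2 hna]
    simp

theorem pv_set_contains (s : PySem.Set String) (x : String) :
    PySem.Set.contains s x = List.contains s x := rfl

theorem pv_foldl_insert_val (l : List String) (d : PySem.Dict String Int) (s : List String) :
    (l.foldl (fun acc key => acc.insert key (d.getD key 0))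
        (PySem.Dict.mk (s.map (fun k => (k, d.getD k 0))))).items
      = (PySem.Set.update s l).map (fun k => (k, d.getD k 0)) := by
  induction l generalizing s with
  | nil => simp [PySem.Set.update]
  | cons k t ih =>
    have hc : (PySem.Dict.mk (s.map (fun k => (k, d.getD k 0)))).contains k = s.contains k := by
      simpa [PySem.Dict.contains] using pv_anyScans s (fun k => d.getD k 0) k
    by_cases h : s.contains k = true
    · have hins : (PySem.Dict.mk (s.map (fun k => (k, d.getD k 0)))).insert k (d.getD k 0)
          = PySem.Dict.mk (s.map (fun k => (k, d.getD k 0))) := by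
        simp only [PySem.Dict.insert, hc, h, if_pos]
        congr 1
        rw [List.map_map]
        refine List.map_congr_left (fun x _ => ?_)
        by_cases hx : x = k <;> simp [hx]
      have hadd : PySem.Set.add s k = s := by unfold PySem.Set.add; rw [pv_set_contains, if_pos h]
      have hupd : PySem.Set.update s (k :: t) = PySem.Set.update s t := by
        rw [PySem.Set.update, List.foldl_cons, hadd]; rfl
      simp only [List.foldl_cons]
      rw [hins, ih s, hupd]
    · have h' : s.contains k = false := by simpa using h
      have hins : (PySem.Dict.mk (s.map (fun k => (k, d.getD k 0)))).insert k (d.getD k 0)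
          = PySem.Dict.mk ((s ++ [k]).map (fun k => (k, d.getD k 0))) := by
        simp only [PySem.Dict.insert, hc, h', Bool.false_eq_true, if_false]
        congr 1
        simp
      have hadd : PySem.Set.add s k = s ++ [k] := by
        unfold PySem.Set.add; rw [pv_set_contains, h']; simp
      have hupd : PySem.Set.update s (k :: t) = PySem.Set.update (s ++ [k]) t := by
        rw [PySem.Set.update, List.foldl_cons, hadd]; rfl
      simp only [List.foldl_cons]
      rw [hins, ih (s ++ [k]), hupd]

theorem pv_set_update_filter (l : List String) (s : PySem.Set String) (x : String)
    (hx : s.contains x = true) :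
    PySem.Set.update s l = PySem.Set.update s (l.filter (fun y => !(y == x))) := by
  induction l generalizing s with
  | nil => rfl
  | cons y t ih =>
    by_cases h : y = x
    · subst h
      have hx2 : List.contains s y = true := hx
      have hadd : PySem.Set.add s y = s := by
        unfold PySem.Set.add
        rw [pv_set_contains, if_pos hx2]
      rw [List.filter_cons, if_neg (by simp), PySem.Set.update, List.foldl_cons, hadd]
      exact ih s hx
    · have hx' : (PySem.Set.add s y).contains x = true := by
        unfold PySem.Set.add
        rw [pv_set_contains]
        split <;> simp_all [List.contains_append]
      rw [List.filter_cons, if_pos (by simp [h]), PySem.Set.update, List.foldl_cons,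
          PySem.Set.update, List.foldl_cons]
      exact ih (PySem.Set.add s y) hx'

theorem pv_set_update_append (l : List String) (s m : List String)
    (h : ∀ y ∈ l, s.contains y = false) :
    PySem.Set.update (s ++ m) l = s ++ PySem.Set.update m l := by
  induction l generalizing m with
  | nil => rfl
  | cons y t ih =>
    have hy : s.contains y = false := h y (by simp)
    have hadd : PySem.Set.add (s ++ m) y = s ++ PySem.Set.add m y := by
      unfold PySem.Set.add
      have hc : PySem.Set.contains (s ++ m) y = PySem.Set.contains m y := by
        rw [pv_set_contains, pv_set_contains, List.contains_append, hy, Bool.false_or]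
      rw [hc]
      cases hm : PySem.Set.contains m y <;> simp
    rw [PySem.Set.update, List.foldl_cons, hadd]
    exact ih (PySem.Set.add m y) (fun z hz => h z (List.mem_cons_of_mem _ hz))

theorem pv_set_ofList_cons (n : String) (l : List String) :
    PySem.Set.ofList (n :: l) = n :: PySem.Set.ofList (l.filter (fun y => !(y == n))) := by
  have h1 : PySem.Set.ofList (n :: l) = PySem.Set.update [n] l := by
    rw [PySem.Set.ofList, List.foldl_cons]; rfl
  rw [h1, pv_set_update_filter l [n] n (by simp)]
  have h2 : ([n] : List String) ++ ([] : List String) = [n] := rfl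
  rw [← h2, pv_set_update_append]
  · rfl
  · intro y hy
    have := (List.mem_filter.mp hy).2
    simp only [Bool.not_eq_true', beq_eq_false_iff_ne] at this
    simp [this]

theorem pv_set_ofList_nodup (l : List String) (h : l.Nodup) :
    PySem.Set.ofList l = l := by
  induction l with
  | nil => rfl
  | cons a t ih =>
    rw [pv_set_ofList_cons]
    have hf : t.filter (fun y => !(y == a)) = t := by
      refine List.filter_eq_self.mpr (fun y hy => ?_)
      have : y ≠ a := fun e => (List.nodup_cons.mp h).1 (e ▸ hy)
      simp [this]
    rw [hf, ih (List.nodup_cons.mp h).2]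

theorem pv_update_nil (l : List String) :
    PySem.Set.update [] l = PySem.Set.ofList l := rfl

theorem pv_keysFilterMap (l : List (String × Int)) (hn : (l.map Prod.fst).Nodup)
    (q : String → Bool) :
    ((l.map Prod.fst).filter q).map (fun k => (k, (PySem.Dict.mk l).getD k 0))
      = l.filter (fun p => q p.1) := by
  induction l with
  | nil => rfl
  | cons a t ih =>
    have hn' := List.nodup_cons.mp hn
    have hhead : (PySem.Dict.mk (a :: t)).getD a.1 0 = a.2 := by
      simp [PySem.Dict.getD, PySem.Dict.get?, List.find?_cons]
    have htail : ∀ k ∈ (t.map Prod.fst).filter q,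
        (PySem.Dict.mk (a :: t)).getD k 0 = (PySem.Dict.mk t).getD k 0 := by
      intro k hkm
      have hk1 : k ∈ t.map Prod.fst := (List.mem_filter.mp hkm).1
      have hkn : (a.1 == k) = false := beq_eq_false_iff_ne.mpr (fun e => hn'.1 (e ▸ hk1))
      simp [PySem.Dict.getD, PySem.Dict.get?, List.find?_cons, hkn]
    have hmc : ((t.map Prod.fst).filter q).map (fun k => (k, (PySem.Dict.mk (a :: t)).getD k 0))
        = ((t.map Prod.fst).filter q).map (fun k => (k, (PySem.Dict.mk t).getD k 0)) :=
      List.map_congr_left (fun k hkm => by rw [htail k hkm])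
    by_cases hq : q a.1 = true
    · rw [List.map_cons, List.filter_cons, if_pos hq, List.filter_cons, if_pos hq,
          List.map_cons, hhead, hmc, ih hn'.2]
    · rw [List.map_cons, List.filter_cons, if_neg (by simp [hq]), List.filter_cons,
          if_neg (by simp [hq]), hmc, ih hn'.2]

theorem pv_A_eq_F (names : List String) (d : PySem.Dict String Int) (hk : d.keys.Nodup) :
    (((names.filter (fun key => d.contains key)).foldl
        (fun acc key => acc.insert key (d.getD key 0)) PySem.Dict.empty).update
      (((d.keys.filter (fun key => !((names.filter (fun key => d.contains key)).contains key))).foldl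
          (fun acc key => acc.insert key (d.getD key 0)) PySem.Dict.empty).items)).items
      = pvF names d := by
  have hd1 : ((names.filter (fun key => d.contains key)).foldl
      (fun acc key => acc.insert key (d.getD key 0)) PySem.Dict.empty).items
      = (PySem.Set.ofList (names.filter (fun key => d.contains key))).map
          (fun k => (k, d.getD k 0)) :=
    pv_foldl_insert_val (names.filter (fun key => d.contains key)) d []
  have hrem : d.keys.filter
        (fun key => !((names.filter (fun key => d.contains key)).contains key))
      = d.keys.filter (fun key => !(names.contains key)) := by
    refine List.filter_congr (fun k hkm => ?_)
    have hck : d.contains k = true := (PySem.Dict.contains_iff_mem_keys d k).mpr hkm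
    have hcc : (names.filter (fun key => d.contains key)).contains k = names.contains k := by
      rw [Bool.eq_iff_iff]
      simp [List.contains_iff_mem, List.mem_filter, hck]
    rw [hcc]
  have hnd : (d.keys.filter (fun key => !(names.contains key))).Nodup := hk.filter _
  have hd2 : ((d.keys.filter
        (fun key => !((names.filter (fun key => d.contains key)).contains key))).foldl
      (fun acc key => acc.insert key (d.getD key 0)) PySem.Dict.empty).items
      = d.items.filter (fun p => !(names.contains p.1)) := by
    rw [hrem]
    have h1 := pv_foldl_insert_val (d.keys.filter (fun key => !(names.contains key))) d []
    rw [pv_update_nil, pv_set_ofList_nodup _ hnd] at h1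
    rw [show PySem.Dict.mk (List.map (fun k => (k, d.getD k 0)) ([] : List String))
        = PySem.Dict.empty from rfl] at h1
    rw [h1]
    exact pv_keysFilterMap d.items hk (fun key => !(names.contains key))
  have hdisj : ∀ p ∈ d.items.filter (fun p => !(names.contains p.1)),
      ((names.filter (fun key => d.contains key)).foldl
        (fun acc key => acc.insert key (d.getD key 0)) PySem.Dict.empty).contains p.1 = false := by
    intro p hp
    have hnp : names.contains p.1 = false := by
      have := (List.mem_filter.mp hp).2
      simpa using this
    have hnotmem : p.1 ∉ names := fun hm => by
      rw [List.contains_iff_mem.mpr hm] at hnp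
      simp at hnp
    rw [show ((names.filter (fun key => d.contains key)).foldl
        (fun acc key => acc.insert key (d.getD key 0)) PySem.Dict.empty).contains p.1
      = (((names.filter (fun key => d.contains key)).foldl
        (fun acc key => acc.insert key (d.getD key 0)) PySem.Dict.empty).items.any
        (fun q => q.1 == p.1)) from rfl, hd1, pv_anyScans]
    refine Bool.eq_false_iff.mpr (fun hc => ?_)
    have hmem := List.contains_iff_mem.mp hc
    have := (PySem.Set.mem_ofList (names.filter (fun key => d.contains key)) p.1).mp hmem
    exact hnotmem (List.mem_filter.mp this).1
  have hnodup2 : ((d.items.filter (fun p => !(names.contains p.1))).map Prod.fst).Nodup := by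
    rw [pv_map_fst_filter d.items (fun x => !(names.contains x))]
    exact hk.filter _
  rw [hd2, pv_update_disjoint _ _ hnodup2 hdisj, hd1]
  rfl

theorem pv_B_eq_F (names : List String) (rest out : PySem.Dict String Int)
    (hk : rest.keys.Nodup) (hdisj : ∀ k ∈ rest.keys, out.contains k = false) :
    (((names.foldl pvStep (rest, out)).2.update (names.foldl pvStep (rest, out)).1.items).items)
      = out.items ++ pvF names rest := by
  induction names generalizing rest out with
  | nil =>
    simp only [List.foldl_nil]
    rw [pv_update_disjoint rest.items out hk
      (fun p hp => hdisj p.1 (List.mem_map_of_mem hp))]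
    unfold pvF
    simp
  | cons n t ih =>
    cases hg : rest.get? n with
    | none =>
      have hcf : rest.contains n = false := by
        rw [PySem.Dict.contains_eq_isSome_get?, hg]; rfl
      have hnmem : n ∉ rest.keys := fun hm => by
        rw [(PySem.Dict.contains_iff_mem_keys rest n).mpr hm] at hcf
        simp at hcf
      have hstep : pvStep (rest, out) n = (rest, out) := by
        simp [pvStep, PySem.Dict.pop?, hg]
      rw [List.foldl_cons, hstep, ih rest out hk hdisj]
      unfold pvF
      congr 2
      · rw [List.filter_cons, if_neg (by simp [hcf])]
      · refine List.filter_congr (fun p hp => ?_)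
        have hpn : (n == p.1) = false := by
          refine beq_eq_false_iff_ne.mpr (fun e => ?_)
          exact hnmem (e ▸ List.mem_map_of_mem hp)
        have hpn' : p.1 ≠ n := fun e => by simp [e] at hpn
        simp [List.contains_cons, hpn, hpn']
    | some v =>
      have hct : rest.contains n = true := by
        rw [PySem.Dict.contains_eq_isSome_get?, hg]; rfl
      have hnk : n ∈ rest.keys := (PySem.Dict.contains_iff_mem_keys rest n).mp hct
      have hout : out.contains n = false := hdisj n hnk
      have hvv : rest.getD n 0 = v := PySem.Dict.getD_of_get?_eq_some rest 0 hg
      have hstep : pvStep (rest, out) n = (rest.erase n, out.insert n v) := by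
        simp [pvStep, PySem.Dict.pop?, hg]
      have hk' : (rest.erase n).keys.Nodup := by
        rw [pv_keys_erase]; exact hk.filter _
      have hdisj' : ∀ k ∈ (rest.erase n).keys, (out.insert n v).contains k = false := by
        intro k hkm
        rw [pv_keys_erase] at hkm
        obtain ⟨hk1, hk2⟩ := List.mem_filter.mp hkm
        rw [PySem.Dict.contains_insert]
        simp only [Bool.not_eq_eq_eq_not, Bool.not_true] at hk2
        simp [hk2, hdisj k hk1]
      rw [List.foldl_cons, hstep, ih _ _ hk' hdisj',
          PySem.Dict.items_insert_of_not_contains out v hout]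
      unfold pvF
      -- left block: picked pairs
      have hS : (n :: t).filter (fun k => rest.contains k)
          = n :: t.filter (fun k => rest.contains k) := by
        rw [List.filter_cons, if_pos (by simp [hct])]
      have hinner : (t.filter (fun k => rest.contains k)).filter (fun y => !(y == n))
          = t.filter (fun k => (rest.erase n).contains k) := by
        rw [List.filter_filter]
        refine List.filter_congr (fun y _ => ?_)
        rw [pv_contains_erase]
        exact Bool.and_comm _ _
      have hmapS : (PySem.Set.ofList (t.filter (fun k => (rest.erase n).contains k))).map
            (fun k => (k, (rest.erase n).getD k 0))
          = (PySem.Set.ofList (t.filter (fun k => (rest.erase n).contains k))).map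
            (fun k => (k, rest.getD k 0)) := by
        refine List.map_congr_left (fun k hkm => ?_)
        have hkr : (rest.erase n).contains k = true :=
          (List.mem_filter.mp ((PySem.Set.mem_ofList _ k).mp hkm)).2
        have hkn : k ≠ n := by
          have hthis := pv_contains_erase rest n k
          rw [hkr] at hthis
          intro e
          rw [e] at hthis
          simp at hthis
        unfold PySem.Dict.getD
        rw [pv_get?_erase_ne rest n k hkn]
      -- right block: untouched pairs
      have htail2 : (rest.erase n).items.filter (fun p => !(t.contains p.1))
          = rest.items.filter (fun p => !((n :: t).contains p.1)) := by
        have herase : (rest.erase n).items = rest.items.filter (fun p => !(p.1 == n)) := rfl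
        rw [herase, List.filter_filter]
        refine List.filter_congr (fun p _ => ?_)
        rw [List.contains_cons]
        by_cases hpn : p.1 = n <;> simp [hpn, Bool.and_comm]
      rw [hS, pv_set_ofList_cons, hinner, List.map_cons, hmapS, hvv, htail2]
      simp

-- ===== VERDICT (by name: the statement is the Claim_ definition above) =====
theorem sort_dict_by_string_spec : Claim_equal_sort_dict_by_string := by
  intro input_string your_dict _
  unfold Spec_sort_dict_by_string
  by_cases hs : input_string = ""
  · unfold sort_dict_by_string sort_dict_by_string_alt
    rw [if_pos hs, if_pos hs]
  · have hA : sort_dict_by_string input_string your_dict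
        = pvF (((PySem.Str.split? input_string ",").getD []).map PySem.Str.strip)
            (PySem.Dict.ofList your_dict) := by
      unfold sort_dict_by_string
      rw [if_neg hs]
      exact pv_A_eq_F _ _ (PySem.Dict.nodup_keys_ofList _)
    have hfold : ((PySem.Str.split? input_string ",").getD []).foldl
          (fun (st : PySem.Dict String Int × PySem.Dict String Int) name =>
            let name' := PySem.Str.strip name
            match st.1.pop? name' with
            | some (v, rest) => (rest, st.2.insert name' v)
            | none => st)
          (PySem.Dict.ofList your_dict, PySem.Dict.empty)
        = (((PySem.Str.split? input_string ",").getD []).map PySem.Str.strip).foldl pvStep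
            (PySem.Dict.ofList your_dict, PySem.Dict.empty) := by
      rw [List.foldl_map]
      rfl
    have hB : sort_dict_by_string_alt input_string your_dict
        = pvF (((PySem.Str.split? input_string ",").getD []).map PySem.Str.strip)
            (PySem.Dict.ofList your_dict) := by
      unfold sort_dict_by_string_alt
      rw [if_neg hs]
      rw [hfold, pv_B_eq_F _ _ _ (PySem.Dict.nodup_keys_ofList _)
        (fun k _ => PySem.Dict.contains_empty k)]
      rfl
    rw [hA, hB]
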